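-- pv_equiv track=rewrite | github.com/PietroFilippo/torrent-finder-cli | torrent_meta.py | compact_ranges
-- ===== SOURCE A (Python) =====
-- def compact_ranges(indexes: list[int]) -> str:
--     """Convert a sorted list of ints into aria2c --select-file syntax (e.g. '1,3,5-7')."""
--     if not indexes:
--         return ""
--     sorted_idx = sorted(set(indexes))
--     ranges = []
--     start = prev = sorted_idx[0]
--     for n in sorted_idx[1:]:
--         if n == prev + 1:
--             prev = n
--             continue
--         ranges.append(f"{start}" if start == prev else f"{start}-{prev}")
--         start = prev = n
--     ranges.append(f"{start}" if start == prev else f"{start}-{prev}")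
--     return ",".join(ranges)
-- ===== SOURCE B (Python) =====
-- def compact_ranges(indexes: list[int]) -> str:
--     """Convert a sorted list of ints into aria2c --select-file syntax (e.g. '1,3,5-7')."""
--     if not indexes:
--         return ""
--     s = sorted(set(indexes))
--     breaks = [p for p in zip(s, s[1:]) if p[1] != p[0] + 1]
--     starts = [s[0]] + [b for _, b in breaks]
--     ends = [a for a, _ in breaks] + [s[-1]]
--     return ",".join(f"{a}" if a == b else f"{a}-{b}" for a, b in zip(starts, ends))
-- ===== Notes on version B (the rewrite author's own statement) =====
-- stated objective: alternative
-- what changed: Replaces A's stateful start/prev accumulator loop by a stateless adjacent-pairs decomposition: zip(s, s[1:]) finds the run boundaries, the run starts and ends are read off the boundary pairs, and the pieces come from zipping starts with ends.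
import Mathlib
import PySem

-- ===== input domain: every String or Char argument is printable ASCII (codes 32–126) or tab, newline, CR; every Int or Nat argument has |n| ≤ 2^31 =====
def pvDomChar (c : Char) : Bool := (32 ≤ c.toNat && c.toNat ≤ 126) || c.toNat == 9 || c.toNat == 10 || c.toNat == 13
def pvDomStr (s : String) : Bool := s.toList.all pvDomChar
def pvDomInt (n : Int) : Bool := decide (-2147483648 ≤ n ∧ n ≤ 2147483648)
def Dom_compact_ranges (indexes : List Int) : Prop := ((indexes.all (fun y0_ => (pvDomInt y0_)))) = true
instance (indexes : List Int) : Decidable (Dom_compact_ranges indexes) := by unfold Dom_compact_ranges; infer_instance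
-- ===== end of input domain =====

-- B replaces A's stateful start/prev accumulator loop by a stateless adjacent-pairs
-- decomposition (zip of the list with its own tail finds the run boundaries); same result, similar cost.

-- f"{a}" if a == b else f"{a}-{b}"  (the piece both Pythons format for a run [a..b])
def crPiece (a b : Int) : String :=
  if a = b then PySem.Int.toStr a else PySem.Int.toStr a ++ "-" ++ PySem.Int.toStr b

-- ===== PORT A =====
def compact_ranges (indexes : List Int) : String :=
  if indexes = [] then ""
  else
    let sorted_idx := PySem.List.sorted (PySem.Set.ofList indexes) (fun x => x) false
    -- sorted_idx[0]: sorted_idx is nonempty since indexes ≠ [], so pyGetD is exact here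
    let start0 := PySem.List.pyGetD sorted_idx 0 0
    let st := (PySem.List.slice sorted_idx (some 1) none).foldl
      (fun (st : Int × Int × List String) n =>
        if n = st.2.1 + 1 then (st.1, n, st.2.2)
        else (n, n, st.2.2 ++ [crPiece st.1 st.2.1]))
      (start0, start0, ([] : List String))
    PySem.Str.join "," (st.2.2 ++ [crPiece st.1 st.2.1])

-- ===== PORT B =====
def compact_ranges_alt (indexes : List Int) : String :=
  if indexes = [] then ""
  else
    let s := PySem.List.sorted (PySem.Set.ofList indexes) (fun x => x) false
    let breaks := (s.zip (PySem.List.slice s (some 1) none)).filter (fun p => p.2 != p.1 + 1)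
    -- s[0] and s[-1]: s is nonempty since indexes ≠ [], so pyGetD is exact here
    let starts := [PySem.List.pyGetD s 0 0] ++ breaks.map (·.2)
    let ends := breaks.map (·.1) ++ [PySem.List.pyGetD s (-1) 0]
    PySem.Str.join "," ((starts.zip ends).map (fun p => crPiece p.1 p.2))

-- ===== PRECONDITION & SPEC =====
def Spec_compact_ranges (indexes : List Int) (out : String) : Prop := out = compact_ranges_alt indexes
instance (indexes : List Int) (out : String) : Decidable (Spec_compact_ranges indexes out) := by unfold Spec_compact_ranges; infer_instance

-- ===== CLAIM (what is proved, stated in full; the proofs are below) =====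
def Claim_equal_compact_ranges : Prop := ∀ (indexes : List Int), Dom_compact_ranges indexes → Spec_compact_ranges indexes (compact_ranges indexes)

-- ===== LEMMAS AND PROOFS =====

-- reference run decomposition shared by both proofs
def crRuns : Int → Int → List Int → List String
  | start, prev, [] => [crPiece start prev]
  | start, prev, n :: t =>
    if n = prev + 1 then crRuns start n t else crPiece start prev :: crRuns n n t

-- A's fold produces exactly the run pieces
theorem crFoldA (t : List Int) (start prev : Int) (acc : List String) :
    (List.foldl (fun (st : Int × Int × List String) n => if n = st.2.1 + 1 then (st.1, n, st.2.2) else (n, n, st.2.2 ++ [crPiece st.1 st.2.1])) (start, prev, acc) t).2.2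
      ++ [crPiece (List.foldl (fun (st : Int × Int × List String) n => if n = st.2.1 + 1 then (st.1, n, st.2.2) else (n, n, st.2.2 ++ [crPiece st.1 st.2.1])) (start, prev, acc) t).1
            (List.foldl (fun (st : Int × Int × List String) n => if n = st.2.1 + 1 then (st.1, n, st.2.2) else (n, n, st.2.2 ++ [crPiece st.1 st.2.1])) (start, prev, acc) t).2.1]
    = acc ++ crRuns start prev t := by
  induction t generalizing start prev acc with
  | nil => simp [crRuns]
  | cons n t ih =>
    simp only [List.foldl_cons]
    by_cases h : n = prev + 1
    · simp only [if_pos h, crRuns]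
      exact ih start n acc
    · simp only [if_neg h, crRuns]
      rw [ih n n (acc ++ [crPiece start prev])]
      simp

-- B's zip-of-boundaries construction produces exactly the run pieces
theorem crFoldB (t : List Int) (start prev : Int) :
    ((start :: (((prev :: t).zip t).filter (fun p => p.2 != p.1 + 1)).map (fun x => x.2)).zip
      ((((prev :: t).zip t).filter (fun p => p.2 != p.1 + 1)).map (fun x => x.1) ++ [t.getLastD prev])).map
      (fun p => crPiece p.1 p.2) = crRuns start prev t := by
  induction t generalizing start prev with
  | nil => simp [crRuns]
  | cons n t ih =>
    simp only [List.zip_cons_cons, List.filter_cons]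
    by_cases h : n = prev + 1
    · have hc : ((n != prev + 1) = false) := by simp [h]
      have hrec := ih start n
      simp only [hc, Bool.false_eq_true, if_false, List.getLastD_cons]
      rw [hrec]
      simp [crRuns, h]
    · have hc : ((n != prev + 1) = true) := by simp [h]
      have hrec := ih n n
      simp only [hc, if_true, List.map_cons, List.cons_append, List.zip_cons_cons,
        List.getLastD_cons, crRuns, if_neg h]
      rw [hrec]

-- the sorted dedup of a nonempty list is nonempty
theorem crSortedNe (indexes : List Int) (h : indexes ≠ []) :
    PySem.List.sorted (PySem.Set.ofList indexes) (fun x => x) false ≠ [] := by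
  intro hs
  rcases List.exists_mem_of_ne_nil indexes h with ⟨x, hx⟩
  have hm : x ∈ PySem.List.sorted (PySem.Set.ofList indexes) (fun x => x) false := by
    rw [PySem.List.mem_sorted]
    exact (PySem.Set.mem_ofList _ _).2 hx
  rw [hs] at hm
  exact absurd hm (List.not_mem_nil)

-- ===== VERDICT (by name: the statement is the Claim_ definition above) =====
theorem compact_ranges_spec : Claim_equal_compact_ranges := by
  intro indexes _
  unfold Spec_compact_ranges compact_ranges compact_ranges_alt
  by_cases hnil : indexes = []
  · simp [hnil]
  · simp only [if_neg hnil]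
    have hne : PySem.List.sorted (PySem.Set.ofList indexes) (fun x => x) false ≠ [] :=
      crSortedNe indexes hnil
    obtain ⟨h, t, hst⟩ := List.exists_cons_of_ne_nil hne
    rw [hst, PySem.List.slice_from_one]
    simp only [List.tail_cons, PySem.List.pyGetD_zero_cons, List.singleton_append]
    rw [PySem.List.pyGetD_neg_one (h :: t) 0 (List.cons_ne_nil h t),
      List.getLast_eq_getLastD]
    rw [crFoldA t h h []]
    simp only [List.nil_append]
    congr 1
    exact (crFoldB t h h).symm
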